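-- pv_equiv track=rewrite | github.com/pypi-data/pypi-mirror-214 | packages/pdf2txt/pdf2txt-0.7.12-py3-none-any.whl/pdf2txt/table.py | boxes_to_table
-- ===== SOURCE A (Python) =====
-- from collections import Counter
--
-- def boxes_to_table(box_record_dict):
--     """
--     Converts a dictionary of cell:characters mapping into a python list
--     of lists of strings. Tries to split cells into rows, then for each row
--     breaks it down into columns.
--     """
--     boxes = box_record_dict.keys()
--     rows = sorted(list(set(b[1] for b in boxes)), reverse=True)
--     table = []
--     if len(rows) < 2:
--         return table
--     for row in sorted(rows):
--         sorted_row = sorted([b for b in boxes if b[1] == row], key=lambda b: b[0])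
--         table.append([box_record_dict[b] for b in sorted_row])
--
--     return sanitise_table(table)
--
-- def sanitise_table(table):
--     if len(table) < 3:
--         return []
--
--     guess_nb_cols_most_common = Counter(len(l) for l in table if len(l) > 1).most_common(1)
--
--     if not guess_nb_cols_most_common:
--         return []
--     if guess_nb_cols_most_common[0][1] < 2:
--         return []
--
--     else:
--         guess_nb_cols = guess_nb_cols_most_common[0][0]
--
--     if guess_nb_cols < 2:
--         return []
--
--     # only a subset of columns in a pragraph form a table
--     rows = []
--
--     rows_idx = [i for i, r in enumerate(table) if max(guess_nb_cols - 2, 2) <= len(r) <= guess_nb_cols + 1]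
--
--     table = table[min(rows_idx):max(rows_idx) + 1]
--
--     return table
-- ===== SOURCE B (Python) =====
-- from collections import Counter
--
--
-- def boxes_to_table(box_record_dict):
--     # Single pass: bucket the boxes by their row coordinate, then sort rows
--     # and, inside each row, the cells by their column coordinate.
--     buckets = {}
--     for (x, y), v in box_record_dict.items():
--         buckets.setdefault(y, []).append((x, v))
--     if len(buckets) < 2:
--         return []
--     table = [[v for _, v in sorted(cells, key=lambda c: c[0])]
--              for _, cells in sorted(buckets.items(), key=lambda kv: kv[0])]
--     return _sanitise(table)
--
--
-- def _sanitise(table):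
--     if len(table) < 3:
--         return []
--     common = Counter(len(r) for r in table if len(r) > 1).most_common(1)
--     if not common:
--         return []
--     guess, count = common[0]
--     if count < 2 or guess < 2:
--         return []
--     lo, hi = max(guess - 2, 2), guess + 1
--     ok = [lo <= len(r) <= hi for r in table]
--     first = ok.index(True)
--     last = len(ok) - 1 - ok[::-1].index(True)
--     return table[first:last + 1]
-- ===== Notes on version B (the rewrite author's own statement) =====
-- stated objective: faster
-- what changed: B groups the boxes into per-row buckets with a single dict pass and sorts each bucket by x (and its sanitise step finds the first/last qualifying row by index scans instead of building and min/max-ing an index list), replacing A's rescan of all boxes for every distinct row value.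
import Mathlib
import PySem

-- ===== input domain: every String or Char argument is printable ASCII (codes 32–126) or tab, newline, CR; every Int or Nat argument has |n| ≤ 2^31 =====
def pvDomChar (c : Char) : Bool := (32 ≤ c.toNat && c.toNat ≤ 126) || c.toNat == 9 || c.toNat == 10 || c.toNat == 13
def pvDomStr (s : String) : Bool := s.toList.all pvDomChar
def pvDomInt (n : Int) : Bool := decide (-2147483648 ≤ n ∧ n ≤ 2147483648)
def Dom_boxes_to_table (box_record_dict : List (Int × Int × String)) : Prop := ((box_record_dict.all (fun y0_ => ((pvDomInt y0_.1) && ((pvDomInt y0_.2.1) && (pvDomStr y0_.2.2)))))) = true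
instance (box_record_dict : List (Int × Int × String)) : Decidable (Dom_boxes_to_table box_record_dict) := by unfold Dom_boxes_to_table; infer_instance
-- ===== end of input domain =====

-- B buckets the boxes by row coordinate in ONE pass over the dict and sorts each bucket,
-- instead of A's re-scan of all boxes for every distinct row value (fewer passes over the data).

-- ===== PORT A =====
-- box_record_dict[b]: first-match lookup of the key (x, y) in the association list ("" is never reached: looked-up keys come from the list itself)
def pvLookupA (box_record_dict : List (Int × Int × String)) (k : Int × Int) : String :=
  match box_record_dict with
  | [] => ""
  | b :: t => if (b.1, b.2.1) == k then b.2.2 else pvLookupA t k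

-- sanitise_table: Counter(...).most_common(1) is sorted(items, key=count, reverse=True)[:1] (stable);
-- min()/max() of the index list are totalised with a match (the empty case is unreachable from boxes_to_table)
def pvSanitiseA (table : List (List String)) : List (List String) :=
  if table.length < 3 then []
  else
    match (PySem.List.sorted (PySem.Dict.counter ((table.filter (fun l => 1 < l.length)).map (fun l => (l.length : Int)))).items (fun p => p.2) true).take 1 with
    | [] => []
    | (g, c) :: _ =>
      if c < 2 then []
      else if g < 2 then []
      else
        let rows_idx : List Int :=
          ((PySem.List.enumerate table 0).filter
            (fun p => max (g - 2) 2 ≤ (p.2.length : Int) ∧ (p.2.length : Int) ≤ g + 1)).map (fun p => p.1)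
        match PySem.List.min? rows_idx (fun i => i), PySem.List.max? rows_idx (fun i => i) with
        | some mn, some mx => PySem.List.slice table (some mn) (some (mx + 1))
        | _, _ => []

def boxes_to_table (box_record_dict : List (Int × Int × String)) : List (List String) :=
  let boxes : List (Int × Int) := box_record_dict.map (fun b => (b.1, b.2.1))
  let rows : List Int := PySem.List.sorted (PySem.Set.ofList (boxes.map (fun b => b.2))) (fun y => y) true
  if rows.length < 2 then []
  else
    pvSanitiseA ((PySem.List.sorted rows (fun y => y) false).map (fun row =>
      (PySem.List.sorted (boxes.filter (fun b => b.2 == row)) (fun b => b.1) false).map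
        (fun b => pvLookupA box_record_dict b)))

-- ===== PORT B =====
-- _sanitise: ok.index(True) / ok[::-1].index(True) are totalised with a match (the empty case is unreachable from boxes_to_table)
def pvSanitiseB (table : List (List String)) : List (List String) :=
  if table.length < 3 then []
  else
    match (PySem.List.sorted (PySem.Dict.counter ((table.filter (fun r => 1 < r.length)).map (fun r => (r.length : Int)))).items (fun p => p.2) true).take 1 with
    | [] => []
    | (guess, count) :: _ =>
      if count < 2 ∨ guess < 2 then []
      else
        let ok : List Bool := table.map (fun r => decide (max (guess - 2) 2 ≤ (r.length : Int) ∧ (r.length : Int) ≤ guess + 1))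
        match PySem.List.index? ok true, PySem.List.index? ok.reverse true with
        | some first, some rrev =>
          PySem.List.slice table (some (first : Int)) (some (((ok.length : Int) - 1 - (rrev : Int)) + 1))
        | _, _ => []

def boxes_to_table_alt (box_record_dict : List (Int × Int × String)) : List (List String) :=
  let buckets : PySem.Dict Int (List (Int × String)) :=
    box_record_dict.foldl (fun d b => d.modify b.2.1 [] (fun cells => cells ++ [(b.1, b.2.2)])) PySem.Dict.empty
  if buckets.size < 2 then []
  else
    pvSanitiseB ((PySem.List.sorted buckets.items (fun kv => kv.1) false).map
      (fun kv => (PySem.List.sorted kv.2 (fun c => c.1) false).map (fun c => c.2)))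

-- ===== PRECONDITION & SPEC =====
-- Pre_ excludes association lists with duplicate (x, y) keys: box_record_dict IS a dict in Python,
-- a dict never holds the same key twice, so such lists represent no Python input at all.
def Pre_boxes_to_table (box_record_dict : List (Int × Int × String)) : Prop :=
  (box_record_dict.map (fun b => (b.1, b.2.1))).Nodup
instance (box_record_dict : List (Int × Int × String)) : Decidable (Pre_boxes_to_table box_record_dict) := by unfold Pre_boxes_to_table; infer_instance

def pvWitness_boxes_to_table : (List (Int × Int × String)) :=
  [(0, 0, "a"), (1, 0, "b"), (0, 1, "c"), (1, 1, "d"), (0, 2, "e"), (1, 2, "f")]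

def Spec_boxes_to_table (box_record_dict : List (Int × Int × String)) (out : List (List String)) : Prop := out = boxes_to_table_alt box_record_dict
instance (box_record_dict : List (Int × Int × String)) (out : List (List String)) : Decidable (Spec_boxes_to_table box_record_dict out) := by unfold Spec_boxes_to_table; infer_instance

-- ===== CLAIM (what is proved, stated in full; the proofs are below) =====
def Claim_equal_boxes_to_table : Prop := ∀ (box_record_dict : List (Int × Int × String)), Dom_boxes_to_table box_record_dict → Pre_boxes_to_table box_record_dict → Spec_boxes_to_table box_record_dict (boxes_to_table box_record_dict)

-- ===== LEMMAS AND PROOFS =====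

-- a strictly increasing Int list: min is its head, max is its last element

theorem pvMin_pairwise (xs : List Int) (h : xs.Pairwise (· < ·)) :
    PySem.List.min? xs (fun i => i) = xs.head? := by
  cases xs with
  | nil => simpa using (PySem.List.min?_eq_none_iff (α := Int) [] (fun i => i)).2 rfl
  | cons x t =>
    cases hm : PySem.List.min? (x :: t) (fun i => i) with
    | none => exact absurd ((PySem.List.min?_eq_none_iff _ _).1 hm) (by simp)
    | some m =>
      have hmem := PySem.List.min?_mem hm
      have hle : m ≤ x := by simpa using PySem.List.min?_isMin hm x List.mem_cons_self
      rcases List.mem_cons.1 hmem with rfl | hmt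
      · rfl
      · have := (List.pairwise_cons.1 h).1 m hmt
        simp only [List.head?_cons, Option.some.injEq]
        omega

theorem pvMax_pairwise (xs : List Int) (h : xs.Pairwise (· < ·)) :
    PySem.List.max? xs (fun i => i) = xs.getLast? := by
  cases hxs : xs with
  | nil => simpa using (PySem.List.max?_eq_none_iff (α := Int) [] (fun i => i)).2 rfl
  | cons x t =>
    subst hxs
    cases hm : PySem.List.max? (x :: t) (fun i => i) with
    | none => exact absurd ((PySem.List.max?_eq_none_iff _ _).1 hm) (by simp)
    | some m =>
      have hmem := PySem.List.max?_mem hm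
      have hmax : ∀ y ∈ x :: t, y ≤ m := by
        intro y hy; simpa using PySem.List.max?_isMax hm y hy
      have hlen : (x :: t).length - 1 < (x :: t).length := by simp
      have hglast : (x :: t).getLast? = some ((x :: t)[(x :: t).length - 1]) := by
        rw [List.getLast?_eq_getElem?, List.getElem?_eq_getElem hlen]
      rw [hglast]
      have hgmem : (x :: t)[(x :: t).length - 1] ∈ x :: t := List.getElem_mem _
      have h1 : (x :: t)[(x :: t).length - 1] ≤ m := hmax _ hgmem
      obtain ⟨i, hi, hxi⟩ := List.getElem_of_mem hmem
      have hpg := List.pairwise_iff_getElem.1 h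
      rcases Nat.lt_or_ge i ((x :: t).length - 1) with hlt | hge
      · have h2 := hpg i ((x :: t).length - 1) hi hlen hlt
        rw [hxi] at h2
        exfalso; omega
      · have heq : i = (x :: t).length - 1 := by omega
        subst heq; exact congrArg some hxi.symm

-- the index list [i for i, r in enumerate(t, s) if P(r)]: its first element is s + (t.map P).index(True),
-- its last element is s + (len(t) - 1 - reversed(t.map P).index(True))
theorem pvIdxs_head {α : Type} (P : α → Bool) (t : List α) (s : Int) :
    (((PySem.List.enumerate t s).filter (fun p => P p.2)).map (fun p => p.1)).head?
      = (PySem.List.index? (t.map P) true).map (fun n => s + (n : Int)) := by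
  induction t generalizing s with
  | nil => simp [PySem.List.enumerate_nil, PySem.List.index?]
  | cons r t ih =>
    rw [PySem.List.enumerate_cons, List.map_cons]
    by_cases h : P r
    · rw [List.filter_cons_of_pos (by simpa using h), List.map_cons, List.head?_cons,
        h, PySem.List.index?_cons_self]
      simp
    · rw [List.filter_cons_of_neg (by simpa using h), ih,
        PySem.List.index?_cons_of_ne _ (by simpa using h)]
      cases hidx : PySem.List.index? (t.map P) true with
      | none => simp
      | some n => simp; ring

theorem pvIdxs_last {α : Type} (P : α → Bool) (t : List α) (s : Int) :
    (((PySem.List.enumerate t s).filter (fun p => P p.2)).map (fun p => p.1)).getLast?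
      = (PySem.List.index? (t.map P).reverse true).map (fun n => s + ((t.length - 1 - n : Nat) : Int)) := by
  induction t using List.reverseRecOn with
  | nil => simp [PySem.List.enumerate_nil, PySem.List.index?]
  | append_singleton t r ih =>
    rw [PySem.List.enumerate_append, List.filter_append, List.map_append,
      PySem.List.enumerate_cons, PySem.List.enumerate_nil, List.map_append, List.reverse_append]
    by_cases h : P r
    · rw [List.filter_cons_of_pos (by simpa using h)]
      simp only [List.filter_nil, List.map_cons, List.map_nil, List.reverse_nil, List.nil_append,
        List.reverse_cons]
      rw [List.getLast?_concat, h]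
      rw [show ([true] ++ (t.map P).reverse) = true :: (t.map P).reverse by simp,
        PySem.List.index?_cons_self]
      simp
    · rw [List.filter_cons_of_neg (by simpa using h)]
      simp only [List.filter_nil, List.map_nil, List.append_nil]
      rw [ih]
      rw [show ((List.map P [r]).reverse ++ (t.map P).reverse) = (P r) :: (t.map P).reverse by simp,
        PySem.List.index?_cons_of_ne _ (by simpa using h)]
      cases hidx : PySem.List.index? (t.map P).reverse true with
      | none => simp
      | some n =>
        simp only [Option.map_some, Option.some.injEq, List.length_append, List.length_cons,
          List.length_nil]
        congr 1
        omega

-- first-match lookup of an entry own key returns that entry value, given nodup keys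
theorem pvLookupA_self (l : List (Int × Int × String)) (b : Int × Int × String)
    (hnd : (l.map (fun b => (b.1, b.2.1))).Nodup) (hb : b ∈ l) :
    pvLookupA l (b.1, b.2.1) = b.2.2 := by
  induction l with
  | nil => cases hb
  | cons h t ih =>
    rw [List.map_cons, List.nodup_cons] at hnd
    rcases List.mem_cons.1 hb with rfl | hbt
    · simp [pvLookupA]
    · have hne : (h.1, h.2.1) ≠ (b.1, b.2.1) := by
        intro he
        exact hnd.1 (he ▸ List.mem_map.2 ⟨b, hbt, rfl⟩)
      simp only [pvLookupA, beq_iff_eq, if_neg hne]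
      exact ih hnd.2 hbt

-- A's and B's sanitise helpers agree on every table
theorem sanitise_eq (t : List (List String)) : pvSanitiseA t = pvSanitiseB t := by
  unfold pvSanitiseA pvSanitiseB
  split_ifs with h3
  · rfl
  · cases hmc : (PySem.List.sorted (PySem.Dict.counter ((t.filter (fun l => 1 < l.length)).map (fun l => (l.length : Int)))).items (fun p => p.2) true).take 1 with
    | nil => rfl
    | cons gc rest =>
      obtain ⟨g, c⟩ := gc
      by_cases hc : c < 2
      · simp [hc]
      · by_cases hg : g < 2
        · simp [hc, hg]
        · simp only [hc, hg, or_self, if_false]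
          have hpw : ((List.filter (fun p => decide (max (g - 2) 2 ≤ (p.2.length:Int) ∧ (p.2.length:Int) ≤ g + 1)) (PySem.List.enumerate t 0)).map (fun p => p.1)).Pairwise (· < ·) := by
            rw [List.pairwise_map]
            exact List.Pairwise.filter _ (PySem.List.pairwise_lt_enumerate t 0)
          rw [pvMin_pairwise _ hpw, pvMax_pairwise _ hpw,
            pvIdxs_head (fun r : List String => decide (max (g - 2) 2 ≤ (r.length:Int) ∧ (r.length:Int) ≤ g + 1)) t 0,
            pvIdxs_last (fun r : List String => decide (max (g - 2) 2 ≤ (r.length:Int) ∧ (r.length:Int) ≤ g + 1)) t 0]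
          cases hf : PySem.List.index? (t.map (fun r : List String => decide (max (g - 2) 2 ≤ (r.length:Int) ∧ (r.length:Int) ≤ g + 1))) true with
          | none =>
            have hrn : PySem.List.index? (t.map (fun r : List String => decide (max (g - 2) 2 ≤ (r.length:Int) ∧ (r.length:Int) ≤ g + 1))).reverse true = none := by
              rw [PySem.List.index?_eq_none_iff] at *
              simpa using hf
            rw [hrn]
            simp
          | some f =>
            cases hr : PySem.List.index? (t.map (fun r : List String => decide (max (g - 2) 2 ≤ (r.length:Int) ∧ (r.length:Int) ≤ g + 1))).reverse true with
            | none =>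
              exfalso
              rw [PySem.List.index?_eq_none_iff] at hr
              have htr : true ∈ t.map (fun r : List String => decide (max (g - 2) 2 ≤ (r.length:Int) ∧ (r.length:Int) ≤ g + 1)) := by
                obtain ⟨hk, hget, -⟩ := PySem.List.getElem_of_index?_eq_some hf
                exact hget ▸ List.getElem_mem hk
              exact hr (by simpa using htr)
            | some r =>
              obtain ⟨hk, -, -⟩ := PySem.List.getElem_of_index?_eq_some hr
              rw [List.length_reverse, List.length_map] at hk
              simp only [Option.map_some, List.length_map, zero_add]
              have hcast : ((t.length - 1 - r : Nat) : Int) = (t.length : Int) - 1 - (r : Int) := by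
                rw [Nat.cast_sub (show r ≤ t.length - 1 by omega), Nat.cast_sub (show 1 ≤ t.length by omega)]
                norm_num
              rw [hcast]
              simp

-- the grouped tables agree
theorem main_eq (l : List (Int × Int × String))
    (hpre : (l.map (fun b => (b.1, b.2.1))).Nodup) :
    boxes_to_table l = boxes_to_table_alt l := by
  unfold boxes_to_table boxes_to_table_alt
  simp only []
  -- shared abbreviations
  have hys : (l.map (fun b : Int × Int × String => (b.1, b.2.1))).map (fun b => b.2) = l.map (fun b => b.2.1) := by
    rw [List.map_map]; rfl
  -- buckets facts
  have hb2 : l.foldl (fun d b => d.modify b.2.1 [] (fun cells => cells ++ [(b.1, b.2.2)])) PySem.Dict.empty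
      = (l.map (fun b : Int × Int × String => (b.2.1, (b.1, b.2.2)))).foldl
          (fun d p => d.modify p.1 [] (fun cells => cells ++ [p.2])) PySem.Dict.empty := by
    rw [List.foldl_map]
  have hkeys : (l.foldl (fun d b => d.modify b.2.1 [] (fun cells => cells ++ [(b.1, b.2.2)])) PySem.Dict.empty).keys
      = PySem.Set.ofList (l.map (fun b => b.2.1)) := by
    have := PySem.Dict.keys_foldl_modify_key l (fun b : Int × Int × String => b.2.1) []
      (fun _ b => (fun cells => cells ++ [(b.1, b.2.2)])) PySem.Dict.empty
    simpa [PySem.Set.update_nil_left] using this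
  have hnd : (l.foldl (fun d b => d.modify b.2.1 [] (fun cells => cells ++ [(b.1, b.2.2)])) PySem.Dict.empty).keys.Nodup := by
    rw [hkeys]; exact PySem.Set.nodup_ofList _
  set buckets := l.foldl (fun d b => d.modify b.2.1 [] (fun cells => cells ++ [(b.1, b.2.2)])) PySem.Dict.empty with hbdef
  have hsize : buckets.size = (PySem.Set.ofList (l.map (fun b => b.2.1))).length := by
    have h1 : buckets.size = buckets.keys.length := by
      simp [PySem.Dict.size, PySem.Dict.keys]
    rw [h1, hkeys]
  rw [hys]
  by_cases hlt : (PySem.List.sorted (PySem.Set.ofList (l.map (fun b => b.2.1))) (fun y => y) true).length < 2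
  · rw [if_pos hlt, if_pos (by rw [hsize]; rw [PySem.List.length_sorted] at hlt; exact hlt)]
  · rw [if_neg hlt, if_neg (by rw [hsize]; rw [PySem.List.length_sorted] at hlt; exact hlt)]
    have hsd : PySem.List.sorted (PySem.List.sorted (PySem.Set.ofList (l.map (fun b => b.2.1))) (fun y => y) true) (fun y => y) false
        = PySem.List.sorted (PySem.Set.ofList (l.map (fun b => b.2.1))) (fun y => y) false :=
      PySem.List.sorted_eq_sorted_of_perm _ _ _ (fun a b h => h) (PySem.List.sorted_perm _ _ _)
    have hitems : buckets.items = (PySem.Set.ofList (l.map (fun b => b.2.1))).map (fun y => (y, buckets.getD y [])) := by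
      rw [PySem.Dict.items_eq_map_keys buckets hnd [], hkeys]
    have hsorted_items : PySem.List.sorted buckets.items (fun kv => kv.1) false
        = (PySem.List.sorted (PySem.Set.ofList (l.map (fun b => b.2.1))) (fun y => y) false).map (fun y => (y, buckets.getD y [])) := by
      apply PySem.List.sorted_eq_of_perm_of_pairwise_lt
      · rw [hitems]; exact (PySem.List.sorted_perm _ _ _).map _
      · rw [List.pairwise_map]
        exact PySem.List.sorted_ofList_pairwise_lt (l.map (fun b => b.2.1))
    have hgetD : ∀ y : Int, buckets.getD y [] = (l.filter (fun b => b.2.1 == y)).map (fun b => (b.1, b.2.2)) := by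
      intro y
      rw [hb2, PySem.Dict.getD_foldl_modify_append, PySem.Dict.getD_empty, List.nil_append,
        List.filter_map, List.map_map]
      rfl
    rw [hsd, hsorted_items, List.map_map, sanitise_eq]
    congr 1
    apply List.map_congr_left
    intro y hy
    simp only [Function.comp]
    rw [hgetD y]
    rw [show (l.map (fun b : Int × Int × String => (b.1, b.2.1))).filter (fun b => b.2 == y)
          = (l.filter (fun b : Int × Int × String => b.2.1 == y)).map (fun b => (b.1, b.2.1)) from by
      rw [List.filter_map]; rfl]
    set m := l.filter (fun b : Int × Int × String => b.2.1 == y) with hm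
    have hmsub : m.Sublist l := List.filter_sublist
    have hmkey : (m.map (fun b : Int × Int × String => (b.1, b.2.1))).Nodup := hpre.sublist (hmsub.map _)
    have hmy : ∀ b ∈ m, b.2.1 = y := by
      intro b hb
      have := (List.mem_filter.1 (hm ▸ hb)).2
      simpa using this
    have hmfst : (m.map (fun b : Int × Int × String => b.1)).Nodup := by
      apply List.pairwise_map.2
      have h1 : m.Pairwise (fun a b : Int × Int × String => (a.1, a.2.1) ≠ (b.1, b.2.1)) := List.pairwise_map.1 hmkey
      refine h1.imp_of_mem ?_
      intro a b ha hb hne heq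
      exact hne (by rw [Prod.mk.injEq]; exact ⟨heq, by rw [hmy a ha, hmy b hb]⟩)
    have hpwlt : (PySem.List.sorted m (fun b => b.1) false).Pairwise (fun a b : Int × Int × String => a.1 < b.1) := by
      have hle := PySem.List.sorted_pairwise m (fun b : Int × Int × String => b.1)
      have hperm := (PySem.List.sorted_perm m (fun b : Int × Int × String => b.1) false).map (fun b : Int × Int × String => b.1)
      have hne : (PySem.List.sorted m (fun b => b.1) false).Pairwise (fun a b : Int × Int × String => a.1 ≠ b.1) :=
        List.pairwise_map.1 (hperm.nodup_iff.2 hmfst)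
      exact (hle.and hne).imp (fun h => lt_of_le_of_ne h.1 h.2)
    have h10 : PySem.List.sorted (m.map (fun b : Int × Int × String => (b.1, b.2.1))) (fun b => b.1) false
        = (PySem.List.sorted m (fun b => b.1) false).map (fun b => (b.1, b.2.1)) := by
      apply PySem.List.sorted_eq_of_perm_of_pairwise_lt
      · exact (PySem.List.sorted_perm _ _ _).map _
      · rw [List.pairwise_map]; exact hpwlt
    have h11 : PySem.List.sorted (m.map (fun b : Int × Int × String => (b.1, b.2.2))) (fun c => c.1) false
        = (PySem.List.sorted m (fun b => b.1) false).map (fun b => (b.1, b.2.2)) := by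
      apply PySem.List.sorted_eq_of_perm_of_pairwise_lt
      · exact (PySem.List.sorted_perm _ _ _).map _
      · rw [List.pairwise_map]; exact hpwlt
    rw [h10, h11, List.map_map, List.map_map]
    apply List.map_congr_left
    intro b hb
    have hbm : b ∈ m := (PySem.List.mem_sorted _ _ _ _).1 hb
    exact pvLookupA_self l b hpre (hmsub.mem hbm)


-- ===== VERDICT (by name: the statement is the Claim_ definition above) =====
theorem boxes_to_table_spec : Claim_equal_boxes_to_table := by
  intro box_record_dict _ hpre
  unfold Spec_boxes_to_table
  exact main_eq box_record_dict hpre
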